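-- pv_equiv track=rewrite | github.com/vidschauhan/LearnPython | src/udemy/deessentials/python/aggregation/custom_map_reduce.py | reduce_by_key
-- ===== SOURCE A (Python) =====
-- def reduce_by_key(orders_dict):
--     cust_order = {}
--     for oi, values in orders_dict:
--         if oi in cust_order:
--             cust_order[oi] = (values, cust_order.get(oi)[1] + 1)
--         else:
--             cust_order[oi] = (values, 1)
--     return cust_order
-- ===== SOURCE B (Python) =====
-- def reduce_by_key(orders_dict):
--     pairs = list(orders_dict)
--     keys = [oi for oi, _ in pairs]
--     last = dict(pairs)
--     return {k: (last[k], keys.count(k)) for k in dict.fromkeys(keys)}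
-- ===== Notes on version B (the rewrite author's own statement) =====
-- stated objective: alternative
-- what changed: Replaces A's single interleaved dict accumulation (updating (last value, count) per key in place) with three declarative tables built separately - the key list, a last-value dict via dict(pairs), and per-key counts via list.count - combined by a comprehension over the first-appearance key order dict.fromkeys(keys).
import Mathlib
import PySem

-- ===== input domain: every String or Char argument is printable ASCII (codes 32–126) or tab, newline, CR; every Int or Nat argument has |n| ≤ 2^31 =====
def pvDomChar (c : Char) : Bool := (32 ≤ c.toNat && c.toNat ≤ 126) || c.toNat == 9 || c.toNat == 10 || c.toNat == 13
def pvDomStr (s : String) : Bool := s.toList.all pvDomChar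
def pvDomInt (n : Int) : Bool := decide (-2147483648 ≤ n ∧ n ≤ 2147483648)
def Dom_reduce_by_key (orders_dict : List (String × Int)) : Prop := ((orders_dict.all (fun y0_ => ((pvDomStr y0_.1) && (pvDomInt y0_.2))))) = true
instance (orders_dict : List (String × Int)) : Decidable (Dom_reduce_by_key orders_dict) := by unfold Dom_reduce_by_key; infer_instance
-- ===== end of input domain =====

-- B replaces A's single interleaved dict accumulation by two declarative tables (a last-value
-- dict and per-key counts) combined over the first-appearance key order; objective: alternative
-- decomposition, not speed.

-- ===== PORT A =====
-- one loop over the pairs, updating (last value, count) per key in place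
def reduce_by_key (orders_dict : List (String × Int)) : List (String × Int × Int) :=
  (orders_dict.foldl (fun cust_order p =>
      if cust_order.contains p.1 then
        -- cust_order.get(oi)[1]: the key is present, so .get returns the stored pair
        cust_order.insert p.1 (p.2, ((cust_order.get? p.1).map Prod.snd).getD 0 + 1)
      else
        cust_order.insert p.1 (p.2, 1)) PySem.Dict.empty).items

-- ===== PORT B =====
-- pairs/keys materialised once; last = dict(pairs); result comprehension over dict.fromkeys(keys)
def reduce_by_key_alt (orders_dict : List (String × Int)) : List (String × Int × Int) :=
  let pairs := orders_dict
  let keys := pairs.map (fun p => p.1)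
  let last := PySem.Dict.ofList pairs
  -- last[k]: every k ∈ dict.fromkeys(keys) is a key of last, so the getD default is never used
  (PySem.Set.ofList keys).map (fun k => (k, (last.getD k 0, (keys.count k : Int))))

-- ===== PRECONDITION & SPEC =====
def Spec_reduce_by_key (orders_dict : List (String × Int)) (out : List (String × Int × Int)) : Prop := out = reduce_by_key_alt orders_dict
instance (orders_dict : List (String × Int)) (out : List (String × Int × Int)) : Decidable (Spec_reduce_by_key orders_dict out) := by unfold Spec_reduce_by_key; infer_instance

-- ===== CLAIM (what is proved, stated in full; the proofs are below) =====
def Claim_equal_reduce_by_key : Prop := ∀ (orders_dict : List (String × Int)), Dom_reduce_by_key orders_dict → Spec_reduce_by_key orders_dict (reduce_by_key orders_dict)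

-- ===== LEMMAS AND PROOFS =====

-- A's loop body, written as a single insert of a conditional value
theorem stepA_eq :
    (fun (cust_order : PySem.Dict String (Int × Int)) (p : String × Int) =>
      if cust_order.contains p.1 then
        cust_order.insert p.1 (p.2, ((cust_order.get? p.1).map Prod.snd).getD 0 + 1)
      else
        cust_order.insert p.1 (p.2, 1))
    = (fun cust_order p => cust_order.insert p.1
        (if cust_order.contains p.1 then (p.2, ((cust_order.get? p.1).map Prod.snd).getD 0 + 1)
         else (p.2, 1))) := by
  funext d p; split <;> rfl

-- what A's fold does to a single lookup: a scan over the list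
theorem foldA_get? (l : List (String × Int)) (d : PySem.Dict String (Int × Int)) (k : String) :
    (l.foldl (fun cust_order p =>
        if cust_order.contains p.1 then
          cust_order.insert p.1 (p.2, ((cust_order.get? p.1).map Prod.snd).getD 0 + 1)
        else
          cust_order.insert p.1 (p.2, 1)) d).get? k
    = l.foldl (fun o p => if p.1 = k then some (p.2, ((o.map Prod.snd).getD 0) + 1) else o)
        (d.get? k) := by
  induction l generalizing d with
  | nil => rfl
  | cons a t ih =>
    simp only [List.foldl_cons]
    rw [ih]
    congr 1
    by_cases hk : a.1 = k
    · subst hk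
      by_cases hc : d.contains a.1
      · simp [hc, PySem.Dict.get?_insert_self]
      · have hn : d.get? a.1 = none := by
          rw [PySem.Dict.get?_eq_none_iff_contains]; simpa using hc
        simp [hc, PySem.Dict.get?_insert_self, hn]
    · have hne : k ≠ a.1 := fun h => hk h.symm
      by_cases hc : d.contains a.1 <;>
        simp [hc, PySem.Dict.get?_insert, hne, hk]

-- the scan evaluated from a none start: last value and count of the key
theorem scan_eval (l : List (String × Int)) (k : String) :
    l.foldl (fun o p => if p.1 = k then some (p.2, ((o.map Prod.snd).getD 0) + 1) else o)
      (none : Option (Int × Int))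
    = if k ∈ l.map Prod.fst then
        some ((PySem.Dict.ofList l).getD k 0, (((l.map Prod.fst).count k : Nat) : Int))
      else none := by
  induction l using List.reverseRecOn with
  | nil => simp
  | append_singleton t a ih =>
    have hof : PySem.Dict.ofList (t ++ [a]) = (PySem.Dict.ofList t).insert a.1 a.2 := by
      simp [PySem.Dict.ofList, PySem.Dict.update]
    rw [List.foldl_append, ih]
    by_cases hk : a.1 = k
    · subst hk
      by_cases hm : a.1 ∈ t.map Prod.fst
      · simp [hm, hof, PySem.Dict.getD_insert_self, List.count_append]
      · have hc : (t.map Prod.fst).count a.1 = 0 := by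
          simpa using List.count_eq_zero.mpr hm
        simp [hm, hof, PySem.Dict.getD_insert_self, List.count_append, hc]
    · have hne : k ≠ a.1 := fun h => hk h.symm
      by_cases hm : k ∈ t.map Prod.fst <;>
        simp [hm, hk, hof, PySem.Dict.getD_insert, hne]


theorem reduce_by_key_eq_alt (l : List (String × Int)) :
    reduce_by_key l = reduce_by_key_alt l := by
  have halt : reduce_by_key_alt l
      = (PySem.Set.ofList (l.map (fun p => p.1))).map
          (fun k => (k, ((PySem.Dict.ofList l).getD k 0, ((l.map (fun p => p.1)).count k : Int)))) := rfl
  rw [halt]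
  unfold reduce_by_key
  rw [stepA_eq]
  have hkeys : (l.foldl (fun cust_order p => cust_order.insert p.1
        (if cust_order.contains p.1 then (p.2, ((cust_order.get? p.1).map Prod.snd).getD 0 + 1)
         else (p.2, 1))) (PySem.Dict.empty : PySem.Dict String (Int × Int))).keys
      = PySem.Set.ofList (l.map (fun p => p.1)) := by
    rw [PySem.Dict.keys_foldl_insert_key]
    simp [PySem.Dict.keys_empty, PySem.Set.update_nil_left]
  have hnd : (l.foldl (fun cust_order p => cust_order.insert p.1
        (if cust_order.contains p.1 then (p.2, ((cust_order.get? p.1).map Prod.snd).getD 0 + 1)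
         else (p.2, 1))) (PySem.Dict.empty : PySem.Dict String (Int × Int))).keys.Nodup := by
    rw [hkeys]; exact PySem.Set.nodup_ofList _
  have hitems := PySem.Dict.items_eq_map_keys _ hnd (((0 : Int), (0 : Int)) : Int × Int)
  rw [hitems, hkeys]
  apply List.map_congr_left
  intro k hkmem
  have hmem : k ∈ l.map Prod.fst := by
    have := (PySem.Set.mem_ofList (xs := l.map (fun p => p.1)) (y := k)).mp hkmem
    simpa using this
  have hget : (l.foldl (fun cust_order p => cust_order.insert p.1
        (if cust_order.contains p.1 then (p.2, ((cust_order.get? p.1).map Prod.snd).getD 0 + 1)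
         else (p.2, 1))) (PySem.Dict.empty : PySem.Dict String (Int × Int))).get? k
      = some ((PySem.Dict.ofList l).getD k 0, (((l.map Prod.fst).count k : Nat) : Int)) := by
    rw [← stepA_eq, foldA_get?]
    have : (PySem.Dict.empty : PySem.Dict String (Int × Int)).get? k = none := by
      simp [PySem.Dict.get?_empty]
    rw [this, scan_eval, if_pos hmem]
  rw [PySem.Dict.getD_eq_get?_getD, hget]
  simp

-- ===== VERDICT (by name: the statement is the Claim_ definition above) =====
theorem reduce_by_key_spec : Claim_equal_reduce_by_key := by
  intro l _
  unfold Spec_reduce_by_key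
  exact reduce_by_key_eq_alt l
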